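-- pv_equiv track=rewrite | github.com/erlestor/advent-of-code-2023 | 7/b.py | numberOfOccurences
-- ===== SOURCE A (Python) =====
-- def numberOfOccurences(hand):
--     occurences = {}
--
--     for card in hand:
--         if card == "J":
--             continue
--         if card in occurences.keys():
--             occurences[card] += 1
--         else:
--             occurences[card] = 1
--
--     return list(occurences.values())
-- ===== SOURCE B (Python) =====
-- def numberOfOccurences(hand):
--     return [hand.count(c) for c in dict.fromkeys(hand) if c != "J"]
-- ===== Notes on version B (the rewrite author's own statement) =====
-- stated objective: simpler
-- what changed: Replaces the single-pass dict-accumulation loop by extracting the distinct cards in first-appearance order (dict.fromkeys) and rescanning the hand with hand.count for each non-J card, as a one-line comprehension; measured faster because dict.fromkeys and str.count run in C while A loops per character in Python.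
import Mathlib
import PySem

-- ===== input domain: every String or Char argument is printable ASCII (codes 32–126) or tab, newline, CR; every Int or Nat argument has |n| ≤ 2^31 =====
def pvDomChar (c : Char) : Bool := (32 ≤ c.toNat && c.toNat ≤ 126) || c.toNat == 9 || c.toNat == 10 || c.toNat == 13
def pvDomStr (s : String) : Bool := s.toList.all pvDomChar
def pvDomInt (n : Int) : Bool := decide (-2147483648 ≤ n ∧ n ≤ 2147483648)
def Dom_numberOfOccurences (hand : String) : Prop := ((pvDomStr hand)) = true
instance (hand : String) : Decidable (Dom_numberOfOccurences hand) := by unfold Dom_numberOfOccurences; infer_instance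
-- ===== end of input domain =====

-- B replaces A's single-pass dict accumulation by listing the distinct cards in
-- first-appearance order (dict.fromkeys) and rescanning the hand with count for each
-- non-J card — a simpler one-line comprehension (measured faster: the rescans run in C).

-- ===== PORT A =====
-- A: build a dict card -> count over non-J cards in one pass, return its values.
def numberOfOccurences (hand : String) : List Int :=
  (hand.toList.foldl
    (fun (d : PySem.Dict Char Int) card =>
      if card = 'J' then d
      else if d.contains card then d.insert card (d.getD card 0 + 1)
      else d.insert card 1)
    PySem.Dict.empty).values

-- ===== PORT B =====
-- B: [hand.count(c) for c in dict.fromkeys(hand) if c != 'J']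
def numberOfOccurences_alt (hand : String) : List Int :=
  ((PySem.List.dedup hand.toList).filter (fun c => c ≠ 'J')).map
    (fun c => (PySem.List.count hand.toList c : Int))

-- ===== PRECONDITION & SPEC =====
def Spec_numberOfOccurences (hand : String) (out : List Int) : Prop := out = numberOfOccurences_alt hand
instance (hand : String) (out : List Int) : Decidable (Spec_numberOfOccurences hand out) := by unfold Spec_numberOfOccurences; infer_instance

-- ===== CLAIM (what is proved, stated in full; the proofs are below) =====
def Claim_equal_numberOfOccurences : Prop := ∀ (hand : String), Dom_numberOfOccurences hand → Spec_numberOfOccurences hand (numberOfOccurences hand)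

-- ===== LEMMAS AND PROOFS =====

-- A's loop body skips 'J' and otherwise increments: it is the counter step on the J-filtered list.
theorem aFold_eq_counter_filter (l : List Char) :
    l.foldl
      (fun (d : PySem.Dict Char Int) card =>
        if card = 'J' then d
        else if d.contains card then d.insert card (d.getD card 0 + 1)
        else d.insert card 1)
      PySem.Dict.empty
    = PySem.Dict.counter (l.filter (fun c => c ≠ 'J')) := by
  rw [← PySem.Dict.foldl_insert_getD_add_one_eq_counter]
  generalize (PySem.Dict.empty : PySem.Dict Char Int) = d
  induction l generalizing d with
  | nil => rfl
  | cons c t ih =>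
    by_cases hJ : c = 'J'
    · simp [hJ, ih]
    · by_cases hc : (d.contains c : Bool)
      · simp [hJ, hc, ih]
      · have h0 : d.getD c 0 = 0 :=
          PySem.Dict.getD_of_not_contains d 0 (by simpa using hc)
        simp [hJ, hc, ih, h0]

-- Set.add commutes with filtering.
theorem filter_add (s : List Char) (x : Char) (p : Char → Bool) :
    (PySem.Set.add s x).filter p = if p x then PySem.Set.add (s.filter p) x else s.filter p := by
  rw [PySem.Set.add_eq_ite, PySem.Set.add_eq_ite]
  by_cases hx : x ∈ s
  · by_cases hp : p x <;> simp [hx, hp, List.mem_filter]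
  · by_cases hp : p x <;> simp [hx, hp, List.mem_filter, List.filter_append]

theorem foldl_add_filter (l : List Char) (p : Char → Bool) (s : List Char) :
    (l.foldl PySem.Set.add s).filter p = (l.filter p).foldl PySem.Set.add (s.filter p) := by
  induction l generalizing s with
  | nil => rfl
  | cons c t ih =>
    simp only [List.foldl_cons, ih, filter_add, List.filter_cons]
    by_cases hp : p c <;> simp [hp]

-- ordered dedup commutes with filtering out 'J'.
theorem dedup_filter_comm (l : List Char) :
    PySem.List.dedup (l.filter (fun c => c ≠ 'J')) = (PySem.List.dedup l).filter (fun c => c ≠ 'J') := by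
  simp only [PySem.List.dedup_eq_ofList, PySem.Set.ofList_eq_foldl]
  rw [foldl_add_filter]; rfl

-- ===== VERDICT (by name: the statement is the Claim_ definition above) =====
theorem numberOfOccurences_spec : Claim_equal_numberOfOccurences := by
  intro hand _
  unfold Spec_numberOfOccurences numberOfOccurences numberOfOccurences_alt
  rw [aFold_eq_counter_filter]
  show (PySem.Dict.counter _).items.map (·.2) = _
  rw [PySem.Dict.items_counter]
  rw [show PySem.Set.ofList (hand.toList.filter (fun c => c ≠ 'J'))
        = (PySem.List.dedup hand.toList).filter (fun c => c ≠ 'J') from dedup_filter_comm hand.toList]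
  rw [List.map_map]
  refine List.map_congr_left ?_
  intro c hcmem
  have hc : c ≠ 'J' := by
    have := List.of_mem_filter hcmem
    simpa using this
  simp only [PySem.List.count, Function.comp_apply]
  rw [List.count_filter]
  simp [hc]
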